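-- pv_equiv track=rewrite | github.com/duswo3o/algorithm_codekata | programmers/0807.py | solution
-- ===== SOURCE A (Python) =====
-- def solution(N,A,B):
--     cnt = 0 # 마주치는 대진 순서
--     A, B = A-1, B-1
--     while A != B: # A와 B가 다르면
--         cnt += 1 # 대진 순서 추가
--         A = A//2 # A 업데이트
--         B = B//2 # B 업데이트
--     return cnt
-- ===== SOURCE B (Python) =====
-- def solution(N, A, B):
--     # closed form: the zero-based slots A-1 and B-1 meet after as many halvings
--     # as the highest differing bit position, i.e. the bit length of their XOR
--     return ((A - 1) ^ (B - 1)).bit_length()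
-- ===== Notes on version B (the rewrite author's own statement) =====
-- stated objective: simpler
-- what changed: Replaces the repeated-halving while-loop and counter with the one-line closed form ((A-1)^(B-1)).bit_length(): the highest bit where the zero-based slots differ is exactly the number of halvings until they coincide.
import Mathlib
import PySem

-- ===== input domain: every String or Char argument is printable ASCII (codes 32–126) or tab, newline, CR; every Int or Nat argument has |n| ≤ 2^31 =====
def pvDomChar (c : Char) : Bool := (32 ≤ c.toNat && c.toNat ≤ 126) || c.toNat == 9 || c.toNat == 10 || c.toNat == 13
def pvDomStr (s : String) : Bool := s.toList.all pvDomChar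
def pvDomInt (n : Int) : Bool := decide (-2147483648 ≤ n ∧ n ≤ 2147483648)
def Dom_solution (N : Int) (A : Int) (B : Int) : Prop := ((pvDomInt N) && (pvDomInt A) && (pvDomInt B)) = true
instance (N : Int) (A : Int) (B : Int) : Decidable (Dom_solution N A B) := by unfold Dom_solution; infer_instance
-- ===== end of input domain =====

-- B replaces A's halving loop with the closed form ((A-1) ^ (B-1)).bit_length() (objective: simpler, no loop).

-- ===== PORT A =====
-- A's while-loop, ported with fuel: inside Pre_ the loop runs at most bitLength((A-1)^(B-1)) ≤ 33
-- iterations on the domain, so fuel 100 is never exhausted there.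
def solLoopA : Nat → Int → Int → Int → Int
  | 0, _, _, cnt => cnt
  | f + 1, a, b, cnt =>
    if a = b then cnt
    else solLoopA f (PySem.Int.floordiv a 2) (PySem.Int.floordiv b 2) (cnt + 1)

def solution (N : Int) (A : Int) (B : Int) : Int := solLoopA 100 (A - 1) (B - 1) 0

-- ===== PORT B =====
def solution_alt (N : Int) (A : Int) (B : Int) : Int :=
  Int.ofNat (PySem.Int.bitLength (PySem.Int.bxor (A - 1) (B - 1)))

-- ===== PRECONDITION & SPEC =====
-- Pre_ excludes exactly the mixed-sign inputs (one of A,B ≥ 1, the other ≤ 0) on which A's while-loop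
-- never terminates (a nonnegative and a negative value stay on their side of 0 under floor halving);
-- A returns on every input Pre_ admits.
def Pre_solution (N : Int) (A : Int) (B : Int) : Prop := (1 ≤ A ∧ 1 ≤ B) ∨ (A ≤ 0 ∧ B ≤ 0)
instance (N : Int) (A : Int) (B : Int) : Decidable (Pre_solution N A B) := by unfold Pre_solution; infer_instance
def pvWitness_solution : Int × Int × Int := (8, 4, 7)

def Spec_solution (N : Int) (A : Int) (B : Int) (out : Int) : Prop := out = solution_alt N A B
instance (N : Int) (A : Int) (B : Int) (out : Int) : Decidable (Spec_solution N A B out) := by unfold Spec_solution; infer_instance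

-- ===== CLAIM (what is proved, stated in full; the proofs are below) =====
def Claim_equal_solution : Prop := ∀ (N : Int) (A : Int) (B : Int), Dom_solution N A B → Pre_solution N A B → Spec_solution N A B (solution N A B)

-- ===== LEMMAS AND PROOFS =====

-- Python floor halving of a negative number, in negSucc form: (-(a+1)) // 2 = -(a/2 + 1).
theorem floordiv_negSucc_two (a : Nat) :
    PySem.Int.floordiv (Int.negSucc a) 2 = Int.negSucc (a / 2) := by
  rw [PySem.Int.floordiv_eq_iff_of_pos (by omega)]
  simp only [Int.negSucc_eq]
  omega

-- Python xor of two negatives: (-(a+1)) ^ (-(b+1)) = a ^ b (two's complement).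
theorem bxor_negSucc_negSucc (a b : Nat) :
    PySem.Int.bxor (Int.negSucc a) (Int.negSucc b) = Int.ofNat (a ^^^ b) := by
  simp [PySem.Int.bxor, Int.negSucc_eq]
  omega

-- one halving step shortens the xor's bit length by one
theorem bitLength_step {a b : Nat} (h : a ≠ b) :
    PySem.Int.bitLength ((a ^^^ b : Nat) : Int) =
      PySem.Int.bitLength ((a / 2 ^^^ b / 2 : Nat) : Int) + 1 := by
  have hx : 0 < a ^^^ b := by
    rcases Nat.eq_zero_or_pos (a ^^^ b) with h0 | h0
    · exact absurd (by simpa using Nat.xor_eq_zero_iff.mp h0) h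
    · exact h0
  rw [PySem.Int.bitLength_natCast hx, Nat.xor_div_two]

-- the loop on two nonnegative zero-based slots counts bitLength of the xor
theorem loop_nat (f : Nat) : ∀ (a b : Nat) (cnt : Int),
    PySem.Int.bitLength ((a ^^^ b : Nat) : Int) ≤ f →
    solLoopA f ((a : Int)) ((b : Int)) cnt =
      cnt + ((PySem.Int.bitLength ((a ^^^ b : Nat) : Int) : Nat) : Int) := by
  induction f with
  | zero =>
    intro a b cnt hf
    have h0 : PySem.Int.bitLength ((a ^^^ b : Nat) : Int) = 0 := Nat.le_zero.mp hf
    simp [solLoopA, h0]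
  | succ f ih =>
    intro a b cnt hf
    by_cases hab : a = b
    · subst hab
      simp [solLoopA, Nat.xor_self, PySem.Int.bitLength_zero]
    · have hstep := bitLength_step hab
      have hd : ((a : Int)) ≠ (b : Int) := by
        exact_mod_cast hab
      have hfa : PySem.Int.floordiv ((a : Int)) 2 = ((a / 2 : Nat) : Int) := by
        exact_mod_cast PySem.Int.floordiv_natCast a 2
      have hfb : PySem.Int.floordiv ((b : Int)) 2 = ((b / 2 : Nat) : Int) := by
        exact_mod_cast PySem.Int.floordiv_natCast b 2
      have hf' : PySem.Int.bitLength ((a / 2 ^^^ b / 2 : Nat) : Int) ≤ f := by omega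
      calc solLoopA (f + 1) ((a : Int)) ((b : Int)) cnt
          = solLoopA f ((a / 2 : Nat) : Int) ((b / 2 : Nat) : Int) (cnt + 1) := by
            simp only [solLoopA]
            rw [if_neg hd, hfa, hfb]
        _ = (cnt + 1) + ((PySem.Int.bitLength ((a / 2 ^^^ b / 2 : Nat) : Int) : Nat) : Int) :=
            ih (a / 2) (b / 2) (cnt + 1) hf'
        _ = cnt + ((PySem.Int.bitLength ((a ^^^ b : Nat) : Int) : Nat) : Int) := by
            rw [hstep]; push_cast; omega

-- the loop on two negative slots -(a+1), -(b+1) counts bitLength of a ^ b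
theorem loop_negSucc (f : Nat) : ∀ (a b : Nat) (cnt : Int),
    PySem.Int.bitLength ((a ^^^ b : Nat) : Int) ≤ f →
    solLoopA f (Int.negSucc a) (Int.negSucc b) cnt =
      cnt + ((PySem.Int.bitLength ((a ^^^ b : Nat) : Int) : Nat) : Int) := by
  induction f with
  | zero =>
    intro a b cnt hf
    have h0 : PySem.Int.bitLength ((a ^^^ b : Nat) : Int) = 0 := Nat.le_zero.mp hf
    simp [solLoopA, h0]
  | succ f ih =>
    intro a b cnt hf
    by_cases hab : a = b
    · subst hab
      simp [solLoopA, Nat.xor_self, PySem.Int.bitLength_zero]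
    · have hstep := bitLength_step hab
      have hd : (Int.negSucc a : Int) ≠ Int.negSucc b := by
        simpa using fun h => hab (Int.negSucc.inj h)
      have hf' : PySem.Int.bitLength ((a / 2 ^^^ b / 2 : Nat) : Int) ≤ f := by omega
      calc solLoopA (f + 1) (Int.negSucc a) (Int.negSucc b) cnt
          = solLoopA f (Int.negSucc (a / 2)) (Int.negSucc (b / 2)) (cnt + 1) := by
            simp only [solLoopA]
            rw [if_neg hd, floordiv_negSucc_two, floordiv_negSucc_two]
        _ = (cnt + 1) + ((PySem.Int.bitLength ((a / 2 ^^^ b / 2 : Nat) : Int) : Nat) : Int) :=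
            ih (a / 2) (b / 2) (cnt + 1) hf'
        _ = cnt + ((PySem.Int.bitLength ((a ^^^ b : Nat) : Int) : Nat) : Int) := by
            rw [hstep]; push_cast; omega

-- on the domain, the xor of two 32-bit slots has bit length ≤ 100 (the fuel)
theorem bitLength_le_fuel {a b : Nat} (ha : a < 2 ^ 32) (hb : b < 2 ^ 32) :
    PySem.Int.bitLength ((a ^^^ b : Nat) : Int) ≤ 100 := by
  by_contra hlt
  have hne : ((a ^^^ b : Nat) : Int) ≠ 0 := by
    intro h
    have : PySem.Int.bitLength ((a ^^^ b : Nat) : Int) = 0 := by rw [h]; exact PySem.Int.bitLength_zero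
    omega
  have h1 := PySem.Int.two_pow_bitLength_le _ hne
  have h2 : a ^^^ b < 2 ^ 32 := Nat.xor_lt_two_pow ha hb
  have h3 : ((a ^^^ b : Nat) : Int).natAbs = a ^^^ b := by simp
  have h4 : (2 : Nat) ^ 32 ≤ 2 ^ (PySem.Int.bitLength ((a ^^^ b : Nat) : Int) - 1) :=
    Nat.pow_le_pow_right (by omega) (by omega)
  omega

-- ===== VERDICT (by name: the statement is the Claim_ definition above) =====
theorem solution_spec : Claim_equal_solution := by
  intro N A B hdom hpre
  unfold Spec_solution solution solution_alt
  have hA : -2147483648 ≤ A ∧ A ≤ 2147483648 := by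
    have := hdom; unfold Dom_solution pvDomInt at this; simp at this; omega
  have hB : -2147483648 ≤ B ∧ B ≤ 2147483648 := by
    have := hdom; unfold Dom_solution pvDomInt at this; simp at this; omega
  rcases hpre with ⟨h1, h2⟩ | ⟨h1, h2⟩
  · -- both slots nonnegative
    obtain ⟨a, ha⟩ : ∃ a : Nat, A - 1 = (a : Int) := ⟨(A - 1).toNat, by omega⟩
    obtain ⟨b, hb⟩ : ∃ b : Nat, B - 1 = (b : Int) := ⟨(B - 1).toNat, by omega⟩
    have ha' : a < 2 ^ 32 := by omega
    have hb' : b < 2 ^ 32 := by omega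
    rw [ha, hb, PySem.Int.bxor_natCast,
      loop_nat 100 a b 0 (bitLength_le_fuel ha' hb')]
    simp
  · -- both slots negative
    obtain ⟨a, ha⟩ : ∃ a : Nat, A - 1 = Int.negSucc a := ⟨(-(A - 1) - 1).toNat, by
      simp only [Int.negSucc_eq]; omega⟩
    obtain ⟨b, hb⟩ : ∃ b : Nat, B - 1 = Int.negSucc b := ⟨(-(B - 1) - 1).toNat, by
      simp only [Int.negSucc_eq]; omega⟩
    have ha' : a < 2 ^ 32 := by
      have := ha; simp only [Int.negSucc_eq] at this; omega
    have hb' : b < 2 ^ 32 := by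
      have := hb; simp only [Int.negSucc_eq] at this; omega
    rw [ha, hb, bxor_negSucc_negSucc,
      loop_negSucc 100 a b 0 (bitLength_le_fuel ha' hb')]
    simp
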